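-- pv_equiv track=rewrite | github.com/lingzhao11/TADClam | TADClam.py | boundary_sorted_v2
-- ===== SOURCE A (Python) =====
-- def boundary_sorted_v2(N, mid_boundaries):
--     # for each bin, sorted the tad according to the len of tad, big to small
--     sorted_boundaries=[]
--     for i in range(N - 1, -1, -1):
--         parent_i = []
--         len_parent_i = []
--         for temp in mid_boundaries:
--             if temp[0] <= i and  i <= temp[1]:
--                 parent_i.append(temp)
--                 len_parent_i.append(temp[1]-temp[0])
--         sorted_indices = sorted(range(len(len_parent_i)), key=lambda x: len_parent_i[x], reverse=True)
--         for index in sorted_indices: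
--             if not parent_i[index] in sorted_boundaries:
--                 sorted_boundaries.append(parent_i[index])
--     return sorted_boundaries
-- ===== SOURCE B (Python) =====
-- def boundary_sorted_v2(N, mid_boundaries):
--     # Bucket each interval by its clamped top bin (its first bin in A's downward scan),
--     # then emit buckets in descending bin order, each stably sorted by length descending.
--     groups = {}
--     for t in mid_boundaries:
--         key = t[1] if t[1] < N - 1 else N - 1
--         if 0 <= key and t[0] <= key:
--             groups.setdefault(key, []).append(t)
--     out = []
--     for k in sorted(groups, reverse=True):
--         for t in sorted(groups[k], key=lambda u: u[1] - u[0], reverse=True):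
--             if t not in out:
--                 out.append(t)
--     return out
-- ===== Notes on version B (the rewrite author's own statement) =====
-- stated objective: faster
-- what changed: Replaces A's scan over all N bins (each bin re-filtering all intervals, argsort-sorting them and deduplicating against the whole result list) by a single bucketing pass: group each interval under its clamped top endpoint min(N-1, t[1]), then emit the buckets in descending bin order, each stably sorted by length descending with dedup.
import Mathlib
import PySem

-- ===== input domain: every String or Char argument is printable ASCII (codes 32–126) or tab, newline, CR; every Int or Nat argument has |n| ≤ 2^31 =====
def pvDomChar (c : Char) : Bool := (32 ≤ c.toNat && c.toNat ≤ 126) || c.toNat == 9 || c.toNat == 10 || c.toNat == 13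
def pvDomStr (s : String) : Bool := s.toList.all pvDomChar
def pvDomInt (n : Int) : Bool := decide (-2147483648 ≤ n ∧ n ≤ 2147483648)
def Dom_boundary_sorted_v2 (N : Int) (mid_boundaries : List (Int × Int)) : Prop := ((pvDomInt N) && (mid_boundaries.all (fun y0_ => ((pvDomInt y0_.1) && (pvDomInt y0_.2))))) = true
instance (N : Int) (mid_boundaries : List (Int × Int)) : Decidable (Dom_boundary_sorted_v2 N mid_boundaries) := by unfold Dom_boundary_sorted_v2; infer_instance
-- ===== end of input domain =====

-- B replaces A's scan over all N bins (each bin re-filtering, re-sorting and re-deduplicating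
-- against the whole result) by one bucketing pass over the intervals: group by clamped top
-- endpoint, emit groups in descending bin order, each stably sorted by length descending.

-- ===== PORT A =====
def boundary_sorted_v2 (N : Int) (mid_boundaries : List (Int × Int)) : List (Int × Int) :=
  (PySem.List.pyRange (N - 1) (-1) (-1)).foldl (fun sorted_boundaries i =>
    let st := mid_boundaries.foldl
      (fun (st : List (Int × Int) × List Int) temp =>
        if temp.1 ≤ i ∧ i ≤ temp.2 then (st.1 ++ [temp], st.2 ++ [temp.2 - temp.1]) else st)
      ([], [])
    let parent_i := st.1
    let len_parent_i := st.2
    -- sorted(range(len(len_parent_i)), key=lambda x: len_parent_i[x], reverse=True);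
    -- every index is in range, so pyGetD with a default is exact
    let sorted_indices := PySem.List.sorted
      (PySem.List.pyRange 0 (PySem.List.len len_parent_i) 1)
      (fun x => PySem.List.pyGetD len_parent_i x 0) true
    sorted_indices.foldl (fun sb index =>
      if PySem.List.pyGetD parent_i index (0, 0) ∈ sb then sb
      else sb ++ [PySem.List.pyGetD parent_i index (0, 0)])
      sorted_boundaries) []

-- ===== PORT B =====
def boundary_sorted_v2_alt (N : Int) (mid_boundaries : List (Int × Int)) : List (Int × Int) :=
  let groups : PySem.Dict Int (List (Int × Int)) :=
    mid_boundaries.foldl (fun d t =>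
      let key := if t.2 < N - 1 then t.2 else N - 1
      -- groups.setdefault(key, []).append(t)
      if 0 ≤ key ∧ t.1 ≤ key then d.modify key [] (· ++ [t]) else d)
      PySem.Dict.empty
  (PySem.List.sorted groups.keys (fun x => x) true).foldl (fun out k =>
    -- groups[k]: k is always a key of groups, so getD is exact
    (PySem.List.sorted (groups.getD k []) (fun u => u.2 - u.1) true).foldl (fun out t =>
      if t ∈ out then out else out ++ [t]) out) []

-- ===== PRECONDITION & SPEC =====
def Spec_boundary_sorted_v2 (N : Int) (mid_boundaries : List (Int × Int)) (out : List (Int × Int)) : Prop := out = boundary_sorted_v2_alt N mid_boundaries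
instance (N : Int) (mid_boundaries : List (Int × Int)) (out : List (Int × Int)) : Decidable (Spec_boundary_sorted_v2 N mid_boundaries out) := by unfold Spec_boundary_sorted_v2; infer_instance

-- ===== CLAIM (what is proved, stated in full; the proofs are below) =====
def Claim_equal_boundary_sorted_v2 : Prop := ∀ (N : Int) (mid_boundaries : List (Int × Int)), Dom_boundary_sorted_v2 N mid_boundaries → Spec_boundary_sorted_v2 N mid_boundaries (boundary_sorted_v2 N mid_boundaries)

-- ===== LEMMAS AND PROOFS =====

-- the clamped top endpoint of an interval: the first bin of A's downward scan that hits it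
def pvKey (N : Int) (t : Int × Int) : Int := min (N - 1) t.2
-- an interval is ever collected by A iff its clamped top bin exists and is ≥ its left end
def pvOk (N : Int) (t : Int × Int) : Bool := decide (0 ≤ pvKey N t ∧ t.1 ≤ pvKey N t)
-- the group of intervals whose clamped top bin is k
def pvG (N : Int) (mid : List (Int × Int)) (k : Int) : List (Int × Int) :=
  mid.filter (fun t => pvOk N t && decide (pvKey N t = k))
-- the shared append-if-new loop
def pvDD (acc l : List (Int × Int)) : List (Int × Int) :=
  l.foldl (fun acc t => if t ∈ acc then acc else acc ++ [t]) acc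
def pvLen (t : Int × Int) : Int := t.2 - t.1
def pvSortL (l : List (Int × Int)) : List (Int × Int) := PySem.List.sorted l pvLen true

theorem mem_pvDD (acc l : List (Int × Int)) (t : Int × Int) :
    t ∈ pvDD acc l ↔ t ∈ acc ∨ t ∈ l := by
  induction l generalizing acc with
  | nil => simp [pvDD]
  | cons x xs ih =>
    simp only [pvDD, List.foldl_cons] at *
    by_cases hx : x ∈ acc
    · simp only [if_pos hx, ih]
      constructor
      · rintro (h | h) <;> simp_all
      · rintro (h | h)
        · exact Or.inl h
        · rcases List.mem_cons.mp h with h | h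
          · exact Or.inl (h ▸ hx)
          · exact Or.inr h
    · simp only [if_neg hx, ih, List.mem_append, List.mem_cons]
      tauto

theorem pvDD_append (l acc e : List (Int × Int)) :
    pvDD (acc ++ e) l = acc ++ pvDD e (l.filter (fun t => !decide (t ∈ acc))) := by
  induction l generalizing e with
  | nil => simp [pvDD]
  | cons x xs ih =>
    simp only [pvDD, List.foldl_cons, List.filter_cons] at *
    by_cases hxa : x ∈ acc
    · simp only [hxa, decide_true, Bool.not_true, if_pos (List.mem_append.mpr (Or.inl hxa))]
      simpa using ih e
    · simp only [hxa, decide_false, Bool.not_false, if_true]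
      by_cases hxe : x ∈ e
      · rw [if_pos (List.mem_append.mpr (Or.inr hxe)), List.foldl_cons, if_pos hxe]
        exact ih e
      · have hne : x ∉ acc ++ e := by simp [hxa, hxe]
        rw [if_neg hne, List.foldl_cons, if_neg hxe, List.append_assoc]
        exact ih (e ++ [x])

theorem pvDD_eq (acc l : List (Int × Int)) :
    pvDD acc l = acc ++ pvDD [] (l.filter (fun t => !decide (t ∈ acc))) := by
  have := pvDD_append l acc []
  simpa using this

theorem insertBy_front {α : Type} (b : α → α → Bool) (x : α) (l : List α)
    (h : ∀ z ∈ l, b x z = true) : PySem.List.insertBy b x l = x :: l := by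
  cases l with
  | nil => rfl
  | cons y ys =>
    have hy := h y (by simp)
    simp [PySem.List.insertBy, hy]

theorem filter_insertBy {α : Type} (b : α → α → Bool) (x : α) (ys : List α) (p : α → Bool)
    (h : ys.Pairwise (fun y z => b x y = true → b x z = true)) :
    (PySem.List.insertBy b x ys).filter p =
      if p x then PySem.List.insertBy b x (ys.filter p) else ys.filter p := by
  induction ys with
  | nil => by_cases hp : p x <;> simp [PySem.List.insertBy, hp]
  | cons y ys ih =>
    rcases List.pairwise_cons.mp h with ⟨hy, hys⟩
    by_cases hb : b x y = true
    · have hfront : ∀ z ∈ (y :: ys).filter p, b x z = true := by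
        intro z hz
        rcases List.mem_cons.mp (List.mem_of_mem_filter hz) with h1 | h1
        · exact h1 ▸ hb
        · exact hy z h1 hb
      rw [PySem.List.insertBy, if_pos hb]
      by_cases hp : p x
      · rw [if_pos hp, insertBy_front _ _ _ hfront]
        simp [hp]
      · simp [hp]
    · rw [PySem.List.insertBy, if_neg hb]
      by_cases hpy : p y
      · simp only [List.filter_cons, hpy, if_pos]
        by_cases hp : p x
        · rw [if_pos hp, PySem.List.insertBy, if_neg hb]
          rw [ih hys, if_pos hp]
        · rw [if_neg hp, ih hys, if_neg hp]
      · simp only [List.filter_cons, hpy]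
        rw [ih hys]
        simp

theorem sorted_rev_filter {α κ : Type} [LinearOrder κ] (xs : List α) (key : α → κ) (p : α → Bool) :
    (PySem.List.sorted xs key true).filter p = PySem.List.sorted (xs.filter p) key true := by
  induction xs using List.reverseRecOn with
  | nil => rfl
  | append_singleton xs x ih =>
    rw [PySem.List.sorted_rev_eq_foldl_insertBy, List.foldl_append, List.foldl_cons, List.foldl_nil,
      ← PySem.List.sorted_rev_eq_foldl_insertBy]
    have hpw : (PySem.List.sorted xs key true).Pairwise
        (fun y z => (decide (key y < key x) = true) → (decide (key z < key x) = true)) := by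
      refine (PySem.List.sorted_pairwise_rev xs key).imp ?_
      intro a c hle hlt
      simp only [decide_eq_true_eq] at *
      exact lt_of_le_of_lt hle hlt
    rw [filter_insertBy _ _ _ _ hpw, ih, List.filter_append, List.filter_cons, List.filter_nil]
    by_cases hp : p x
    · simp only [hp, if_pos]
      rw [PySem.List.sorted_rev_eq_foldl_insertBy (xs.filter p ++ [x]), List.foldl_append,
        List.foldl_cons, List.foldl_nil, ← PySem.List.sorted_rev_eq_foldl_insertBy]
    · simp [hp]

theorem map_insertBy {ι α : Type} (g : ι → α) (b : ι → ι → Bool) (b' : α → α → Bool)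
    (x : ι) (ys : List ι) (h : ∀ y ∈ ys, b x y = b' (g x) (g y)) :
    (PySem.List.insertBy b x ys).map g = PySem.List.insertBy b' (g x) (ys.map g) := by
  induction ys with
  | nil => rfl
  | cons y ys ih =>
    have hy := h y (by simp)
    rw [PySem.List.insertBy, List.map_cons, PySem.List.insertBy, ← hy]
    by_cases hb : b x y = true
    · simp [hb]
    · simp only [hb, if_neg, Bool.false_eq_true, not_false_iff, List.map_cons]
      rw [ih (fun z hz => h z (by simp [hz]))]

theorem map_foldl_insertBy {ι α : Type} (g : ι → α) (b : ι → ι → Bool) (b' : α → α → Bool)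
    (l : List ι) (acc : List ι)
    (h : ∀ i ∈ l, ∀ j, (j ∈ acc ∨ j ∈ l) → b i j = b' (g i) (g j)) :
    (l.foldl (fun acc x => PySem.List.insertBy b x acc) acc).map g =
      (l.map g).foldl (fun acc x => PySem.List.insertBy b' x acc) (acc.map g) := by
  induction l generalizing acc with
  | nil => rfl
  | cons i rest ih =>
    rw [List.foldl_cons, List.map_cons, List.foldl_cons]
    rw [← map_insertBy g b b' i acc (fun y hy => h i (by simp) y (Or.inl hy))]
    refine ih (PySem.List.insertBy b i acc) ?_
    intro i' hi' j hj
    rcases hj with hj | hj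
    · rcases (PySem.List.mem_insertBy b i j acc).mp hj with hj | hj
      · exact h i' (by simp [hi']) j (hj ▸ Or.inr (by simp))
      · exact h i' (by simp [hi']) j (Or.inl hj)
    · exact h i' (by simp [hi']) j (Or.inr (by simp [hj]))

-- sorting the index list by length and reading the intervals back is the stable sort by length
theorem pv_argsort (xs : List (Int × Int)) :
    (PySem.List.sorted
      (PySem.List.pyRange 0 (PySem.List.len (xs.map pvLen)) 1)
      (fun x => PySem.List.pyGetD (xs.map pvLen) x 0) true).map
        (fun i => PySem.List.pyGetD xs i (0, 0)) = pvSortL xs := by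
  have hlen : PySem.List.len (xs.map pvLen) = (xs.length : Int) := by
    simp [PySem.List.len_eq]
  have hkey : ∀ k : Int, 0 ≤ k → k < (xs.length : Int) →
      PySem.List.pyGetD (xs.map pvLen) k 0 = pvLen (PySem.List.pyGetD xs k (0, 0)) := by
    intro k h0 hk
    rw [PySem.List.pyGetD_eq_getElem (xs.map pvLen) 0 h0 (by simpa using hk),
        PySem.List.pyGetD_eq_getElem xs (0, 0) h0 hk]
    simp
  rw [hlen, PySem.List.sorted_rev_eq_foldl_insertBy]
  rw [map_foldl_insertBy (fun i => PySem.List.pyGetD xs i (0, 0)) _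
      (fun a b => decide (pvLen b < pvLen a)) _ []
      (by
        intro i hi j hj
        rcases hj with hj | hj
        · cases hj
        · rw [PySem.List.mem_pyRange_one] at hi hj
          rw [hkey i hi.1 hi.2, hkey j hj.1 hj.2])]
  rw [List.map_nil,
    PySem.List.map_pyGetD_pyRange_zero' xs (0, 0)]
  rw [pvSortL, PySem.List.sorted_rev_eq_foldl_insertBy]

theorem pvOk_bounds (N : Int) (t : Int × Int) (h : pvOk N t = true) :
    0 ≤ pvKey N t ∧ pvKey N t ≤ N - 1 ∧ t.1 ≤ pvKey N t ∧ pvKey N t ≤ t.2 := by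
  simp only [pvOk, decide_eq_true_eq] at h
  exact ⟨h.1, min_le_left _ _, h.2, min_le_right _ _⟩

-- A's loop body at bin i collects the intervals containing i, stably sorts them by
-- length descending, and append-if-new's them onto the accumulator
theorem pv_stepA (N : Int) (mid : List (Int × Int)) (acc : List (Int × Int)) (i : Int) :
    (let st := mid.foldl
        (fun (st : List (Int × Int) × List Int) temp =>
          if temp.1 ≤ i ∧ i ≤ temp.2 then (st.1 ++ [temp], st.2 ++ [temp.2 - temp.1]) else st)
        ([], [])
     let parent_i := st.1
     let len_parent_i := st.2
     let sorted_indices := PySem.List.sorted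
        (PySem.List.pyRange 0 (PySem.List.len len_parent_i) 1)
        (fun x => PySem.List.pyGetD len_parent_i x 0) true
     sorted_indices.foldl (fun sb index =>
        if PySem.List.pyGetD parent_i index (0, 0) ∈ sb then sb
        else sb ++ [PySem.List.pyGetD parent_i index (0, 0)]) acc)
    = pvDD acc (pvSortL (mid.filter (fun t => decide (t.1 ≤ i ∧ i ≤ t.2)))) := by
  have hst : ∀ (l : List (Int × Int)) (a : List (Int × Int)) (b : List Int),
      l.foldl (fun (st : List (Int × Int) × List Int) temp =>
          if temp.1 ≤ i ∧ i ≤ temp.2 then (st.1 ++ [temp], st.2 ++ [temp.2 - temp.1]) else st) (a, b)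
        = (a ++ l.filter (fun t => decide (t.1 ≤ i ∧ i ≤ t.2)),
           b ++ (l.filter (fun t => decide (t.1 ≤ i ∧ i ≤ t.2))).map pvLen) := by
    intro l
    induction l with
    | nil => intro a b; simp
    | cons t rest ihl =>
      intro a b
      by_cases hc : t.1 ≤ i ∧ i ≤ t.2
      · rw [List.foldl_cons, if_pos hc, ihl]
        simp [hc, pvLen, List.append_assoc]
      · rw [List.foldl_cons, if_neg hc, ihl]
        simp [hc]
  simp only [hst mid [] [], List.nil_append]
  generalize mid.filter (fun t => decide (t.1 ≤ i ∧ i ≤ t.2)) = P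
  have hfm := List.foldl_map
    (f := fun idx => PySem.List.pyGetD P idx (0, 0))
    (g := fun sb t => if t ∈ sb then sb else sb ++ [t])
    (l := PySem.List.sorted (PySem.List.pyRange 0 (PySem.List.len (P.map pvLen)) 1)
            (fun x => PySem.List.pyGetD (P.map pvLen) x 0) true)
    (init := acc)
  rw [pv_argsort P] at hfm
  exact hfm.symm

theorem pvA_eq (N : Int) (mid : List (Int × Int)) :
    boundary_sorted_v2 N mid
      = (PySem.List.pyRange (N - 1) (-1) (-1)).foldl
          (fun acc i => pvDD acc (pvSortL (mid.filter (fun t => decide (t.1 ≤ i ∧ i ≤ t.2))))) [] := by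
  unfold boundary_sorted_v2
  exact PySem.List.foldl_congr_mem _ _ _ _ (fun acc x _ => pv_stepA N mid acc x)

-- B's bucketing pass, described: the dict maps each present clamped top bin to its group
theorem altB_build_eq (N : Int) (mid : List (Int × Int)) :
    (mid.foldl (fun d t =>
        let key := if t.2 < N - 1 then t.2 else N - 1
        if 0 ≤ key ∧ t.1 ≤ key then d.modify key [] (· ++ [t]) else d)
      (PySem.Dict.empty : PySem.Dict Int (List (Int × Int))))
    = ((mid.filter (pvOk N)).map (fun t => (pvKey N t, t))).foldl
        (fun d p => d.modify p.1 [] (· ++ [p.2])) PySem.Dict.empty := by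
  have hbody : (fun (d : PySem.Dict Int (List (Int × Int))) (t : Int × Int) =>
      let key := if t.2 < N - 1 then t.2 else N - 1
      if 0 ≤ key ∧ t.1 ≤ key then d.modify key [] (· ++ [t]) else d)
      = (fun d t => if 0 ≤ pvKey N t ∧ t.1 ≤ pvKey N t then d.modify (pvKey N t) [] (· ++ [t]) else d) := by
    funext d t
    have hk : (if t.2 < N - 1 then t.2 else N - 1) = pvKey N t := by
      simp only [pvKey, min_def]; split_ifs <;> omega
    simp only [hk]
  rw [hbody, PySem.List.foldl_ite_eq_foldl_filter
        (p := fun t : Int × Int => 0 ≤ pvKey N t ∧ t.1 ≤ pvKey N t), List.foldl_map]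
  rfl

theorem altB_groups_getD (N : Int) (mid : List (Int × Int)) (c : Int) :
    (((mid.filter (pvOk N)).map (fun t => (pvKey N t, t))).foldl
        (fun d p => d.modify p.1 [] (· ++ [p.2])) PySem.Dict.empty).getD c [] = pvG N mid c := by
  rw [PySem.Dict.getD_foldl_modify_append, PySem.Dict.getD_empty, List.nil_append,
      List.filter_map, List.map_map]
  simp only [Function.comp_def]
  rw [List.map_id', List.filter_filter]
  unfold pvG
  apply List.filter_congr
  intro t _
  by_cases h : pvKey N t = c <;> simp [h]

theorem altB_groups_keys (N : Int) (mid : List (Int × Int)) :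
    (((mid.filter (pvOk N)).map (fun t => (pvKey N t, t))).foldl
        (fun d p => d.modify p.1 [] (· ++ [p.2])) PySem.Dict.empty).keys
      = PySem.Set.ofList ((mid.filter (pvOk N)).map (pvKey N)) := by
  rw [PySem.Dict.keys_foldl_modify_key, PySem.Dict.keys_empty, List.map_map]
  rfl

-- the present bins, sorted descending, are exactly the bins of A's scan with nonempty groups
theorem keys_sorted_eq (N : Int) (mid : List (Int × Int)) :
    PySem.List.sorted (PySem.Set.ofList ((mid.filter (pvOk N)).map (pvKey N))) (fun x => x) true
      = (PySem.List.pyRange (N - 1) (-1) (-1)).filter (fun i => !decide (pvG N mid i = [])) := by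
  have hpw : ((PySem.List.pyRange (N - 1) (-1) (-1)).filter
      (fun i => !decide (pvG N mid i = []))).Pairwise (fun a b : Int => b < a) := by
    refine List.Pairwise.filter _ ?_
    rw [PySem.List.pyRange_neg_one_eq_reverse]
    exact List.pairwise_reverse.mpr (PySem.List.pairwise_lt_pyRange_one _ _)
  apply PySem.List.sorted_rev_eq_of_perm_of_pairwise_gt _ _ _ ?_ hpw
  refine (List.perm_ext_iff_of_nodup (hpw.imp (fun h => (ne_of_lt h).symm))
    (PySem.Set.nodup_ofList _)).mpr ?_
  intro k
  constructor
  · intro hk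
    rcases List.mem_filter.mp hk with ⟨hr, hg⟩
    have hgne : pvG N mid k ≠ [] := by simpa using hg
    rcases List.exists_mem_of_ne_nil _ hgne with ⟨t, ht⟩
    rcases List.mem_filter.mp ht with ⟨htm, hp⟩
    have hp' : pvOk N t = true ∧ pvKey N t = k := by simpa using hp
    refine (PySem.Set.mem_ofList _ _).mpr ?_
    exact List.mem_map.mpr ⟨t, List.mem_filter.mpr ⟨htm, hp'.1⟩, hp'.2⟩
  · intro hk
    rcases List.mem_map.mp ((PySem.Set.mem_ofList _ _).mp hk) with ⟨t, htf, rfl⟩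
    rcases List.mem_filter.mp htf with ⟨htm, hok⟩
    have hb := pvOk_bounds N t hok
    refine List.mem_filter.mpr ⟨PySem.List.mem_pyRange_neg_one.mpr ⟨by omega, by omega⟩, ?_⟩
    have htG : t ∈ pvG N mid (pvKey N t) := List.mem_filter.mpr ⟨htm, by simp [hok]⟩
    simpa using List.ne_nil_of_mem htG

theorem altB_eq (N : Int) (mid : List (Int × Int)) :
    boundary_sorted_v2_alt N mid
      = ((PySem.List.pyRange (N - 1) (-1) (-1)).filter (fun i => !decide (pvG N mid i = []))).foldl
          (fun acc i => pvDD acc (pvSortL (pvG N mid i))) [] := by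
  unfold boundary_sorted_v2_alt
  simp only [altB_build_eq, altB_groups_getD, altB_groups_keys, keys_sorted_eq]
  rfl

-- at bin n, with everything of higher clamped top bin already emitted, A's step emits
-- exactly the group of bin n
theorem pv_hstep (N : Int) (mid : List (Int × Int)) (n : Nat) (acc : List (Int × Int))
    (hn : ((n : Int) + 1) ≤ N)
    (hacc : ∀ t, t ∈ acc ↔ (t ∈ mid ∧ pvOk N t = true ∧ (n : Int) < pvKey N t)) :
    pvDD acc (pvSortL (mid.filter (fun t => decide (t.1 ≤ (n : Int) ∧ (n : Int) ≤ t.2))))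
      = pvDD acc (pvSortL (pvG N mid (n : Int))) := by
  rw [pvDD_eq, pvDD_eq acc (pvSortL (pvG N mid (n : Int)))]
  congr 1
  have hGn : ∀ t ∈ pvSortL (pvG N mid (n : Int)), (!decide (t ∈ acc)) = true := by
    intro t ht
    have ht' : t ∈ pvG N mid (n : Int) := (PySem.List.mem_sorted _ _ _ _).mp ht
    rcases List.mem_filter.mp ht' with ⟨htm, hp⟩
    have hp' : pvOk N t = true ∧ pvKey N t = (n : Int) := by simpa using hp
    simp only [Bool.not_eq_true', decide_eq_false_iff_not, hacc]
    rintro ⟨-, -, hlt⟩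
    omega
  rw [List.filter_eq_self.mpr hGn]
  have hcong : ∀ t ∈ pvSortL (mid.filter (fun t => decide (t.1 ≤ (n : Int) ∧ (n : Int) ≤ t.2))),
      (!decide (t ∈ acc)) = (pvOk N t && decide (pvKey N t = (n : Int))) := by
    intro t ht
    have ht' := (PySem.List.mem_sorted _ _ _ _).mp ht
    rcases List.mem_filter.mp ht' with ⟨htm, hc⟩
    have hc' : t.1 ≤ (n : Int) ∧ (n : Int) ≤ t.2 := of_decide_eq_true hc
    have hge : (n : Int) ≤ pvKey N t := le_min (by omega) hc'.2
    have hok : pvOk N t = true := by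
      simp only [pvOk, decide_eq_true_eq]
      exact ⟨by omega, by omega⟩
    have hmem : t ∈ acc ↔ (n : Int) < pvKey N t := by
      rw [hacc]
      simp [htm, hok]
    by_cases hk : pvKey N t = (n : Int)
    · have hno : t ∉ acc := by rw [hmem]; omega
      simp [hno, hok, hk]
    · have hyes : t ∈ acc := by rw [hmem]; omega
      simp [hyes, hok, hk]
  rw [List.filter_congr hcong]
  unfold pvSortL
  rw [sorted_rev_filter, List.filter_filter]
  refine congrArg (fun l => pvDD [] (PySem.List.sorted l pvLen true)) ?_
  unfold pvG
  apply List.filter_congr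
  intro t _
  by_cases hok : pvOk N t = true
  · by_cases hk : pvKey N t = (n : Int)
    · have hb := pvOk_bounds N t hok
      have hcc : t.1 ≤ (n : Int) ∧ (n : Int) ≤ t.2 := ⟨by omega, by omega⟩
      simp [hok, hk, hcc]
    · simp [hk]
  · simp [hok]

theorem pv_main (N : Int) (mid : List (Int × Int)) :
    ∀ (n : Nat) (acc : List (Int × Int)), (n : Int) ≤ N →
    (∀ t, t ∈ acc ↔ (t ∈ mid ∧ pvOk N t = true ∧ (n : Int) - 1 < pvKey N t)) →
    (PySem.List.pyRange ((n : Int) - 1) (-1) (-1)).foldl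
        (fun acc i => pvDD acc (pvSortL (mid.filter (fun t => decide (t.1 ≤ i ∧ i ≤ t.2))))) acc
      = (PySem.List.pyRange ((n : Int) - 1) (-1) (-1)).foldl
        (fun acc i => pvDD acc (pvSortL (pvG N mid i))) acc := by
  intro n
  induction n with
  | zero =>
    intro acc _ _
    rw [PySem.List.pyRange_neg_one_eq_nil (by norm_num)]
    rfl
  | succ n ih =>
    intro acc hn hacc
    have hcast : ((n + 1 : Nat) : Int) - 1 = (n : Int) := by push_cast; ring
    rw [hcast] at hacc ⊢
    have hn' : ((n : Int) + 1) ≤ N := by push_cast at hn; omega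
    rw [PySem.List.pyRange_neg_one_cons (by omega), List.foldl_cons, List.foldl_cons]
    rw [pv_hstep N mid n acc hn' hacc]
    apply ih
    · omega
    · intro t
      rw [mem_pvDD]
      have htg : t ∈ pvSortL (pvG N mid (n : Int)) ↔
          (t ∈ mid ∧ (pvOk N t && decide (pvKey N t = (n : Int))) = true) :=
        (PySem.List.mem_sorted _ _ _ _).trans List.mem_filter
      rw [hacc t, htg]
      simp only [Bool.and_eq_true, decide_eq_true_eq]
      constructor
      · rintro (⟨h1, h2, h3⟩ | ⟨h1, h2, h3⟩)
        · exact ⟨h1, h2, by omega⟩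
        · exact ⟨h1, h2, by omega⟩
      · rintro ⟨h1, h2, h3⟩
        by_cases hk : pvKey N t = (n : Int)
        · exact Or.inr ⟨h1, h2, hk⟩
        · exact Or.inl ⟨h1, h2, by omega⟩

-- ===== VERDICT (by name: the statement is the Claim_ definition above) =====
theorem boundary_sorted_v2_spec : Claim_equal_boundary_sorted_v2 := by
  unfold Claim_equal_boundary_sorted_v2
  intro N mid _
  unfold Spec_boundary_sorted_v2
  rw [pvA_eq, altB_eq]
  by_cases hN : N ≤ 0
  · rw [PySem.List.pyRange_neg_one_eq_nil (by omega)]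
    simp
  · have htn : ((N.toNat : Int)) = N := Int.toNat_of_nonneg (by omega)
    have h1 := pv_main N mid N.toNat []
      (by omega)
      (by
        intro t
        simp only [List.not_mem_nil, false_iff]
        rintro ⟨-, hok, hlt⟩
        have hb := pvOk_bounds N t hok
        omega)
    rw [htn] at h1
    rw [h1]
    have h2 : (PySem.List.pyRange (N - 1) (-1) (-1)).foldl
        (fun acc i => pvDD acc (pvSortL (pvG N mid i))) []
        = (PySem.List.pyRange (N - 1) (-1) (-1)).foldl
          (fun acc i => if pvG N mid i ≠ [] then pvDD acc (pvSortL (pvG N mid i)) else acc) [] := by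
      apply PySem.List.foldl_congr_mem
      intro acc x hx
      by_cases hg : pvG N mid x = []
      · simp [hg, pvDD, pvSortL, PySem.List.sorted]
      · simp [hg]
    rw [h2, PySem.List.foldl_ite_eq_foldl_filter]
    simp only [ne_eq, decide_not]
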